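-- pv_equiv track=rewrite | github.com/generalaimodels/TrainScale | data_pipeline/preprocessing/prompt_engine.py | from_turn_boundaries
-- ===== SOURCE A (Python) =====
-- from typing import (
--     Any,
--     Callable,
--     Dict,
--     FrozenSet,
--     List,
--     Literal,
--     Optional,
--     Sequence,
--     Tuple,
--     Union,
--     TYPE_CHECKING,
-- )
--
-- LABEL_PAD_TOKEN_ID: int = -100
--
-- def from_turn_boundaries(
--     input_ids: List[int],
--     attention_mask: List[int],
--     boundaries: List[Tuple[int, int, str]],
--     train_roles: FrozenSet[str],
-- ) -> List[int]:
--     """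
--     Build labels from turn boundaries ``(start, end, role)``.
--
--     Only tokens whose role is in *train_roles* contribute to the loss;
--     all other positions are masked with ``LABEL_PAD_TOKEN_ID``.
--     """
--     n = len(input_ids)
--     labels: List[int] = [LABEL_PAD_TOKEN_ID] * n
--     for start, end, role in boundaries:
--         if role in train_roles:
--             for i in range(max(0, start), min(end, n)):
--                 if attention_mask[i] == 1:
--                     labels[i] = input_ids[i]
--     return labels
-- ===== SOURCE B (Python) =====
-- LABEL_PAD_TOKEN_ID: int = -100
--
-- def from_turn_boundaries(input_ids, attention_mask, boundaries, train_roles):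
--     n = len(input_ids)
--     # difference-array line sweep: each matching span contributes +1/-1 endpoint
--     # deltas; a single prefix-sum pass emits the labels.
--     delta = [0] * (n + 1)
--     for start, end, role in boundaries:
--         if role in train_roles:
--             s = max(0, start)
--             e = min(end, n)
--             if s < e:
--                 delta[s] += 1
--                 delta[e] -= 1
--     labels = []
--     cov = 0
--     for i in range(n):
--         cov += delta[i]
--         labels.append(input_ids[i] if cov > 0 and attention_mask[i] == 1
--                       else LABEL_PAD_TOKEN_ID)
--     return labels
-- ===== Notes on version B (the rewrite author's own statement) =====
-- stated objective: alternative
-- what changed: B replaces A's nested span loops that write labels in place with a difference-array line sweep: each matching span deposits +1/-1 endpoint deltas and a single prefix-sum pass over positions emits the labels from the running coverage count.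
import Mathlib
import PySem

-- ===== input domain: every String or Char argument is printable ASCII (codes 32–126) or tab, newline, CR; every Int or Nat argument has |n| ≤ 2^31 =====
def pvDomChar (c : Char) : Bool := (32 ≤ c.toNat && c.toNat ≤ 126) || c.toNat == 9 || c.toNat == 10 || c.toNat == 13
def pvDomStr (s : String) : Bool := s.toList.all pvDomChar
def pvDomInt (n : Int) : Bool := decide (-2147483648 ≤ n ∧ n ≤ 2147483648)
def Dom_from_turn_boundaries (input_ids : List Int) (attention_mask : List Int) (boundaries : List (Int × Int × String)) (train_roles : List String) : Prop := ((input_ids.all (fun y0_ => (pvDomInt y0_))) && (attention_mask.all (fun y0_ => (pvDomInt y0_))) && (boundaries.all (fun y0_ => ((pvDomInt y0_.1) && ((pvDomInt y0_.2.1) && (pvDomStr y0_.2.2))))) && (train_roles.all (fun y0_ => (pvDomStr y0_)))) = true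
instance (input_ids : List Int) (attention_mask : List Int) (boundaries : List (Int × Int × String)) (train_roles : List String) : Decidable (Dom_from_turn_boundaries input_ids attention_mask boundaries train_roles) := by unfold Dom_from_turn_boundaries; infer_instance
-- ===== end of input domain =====

-- B replaces A's nested per-position span writes with a difference-array line sweep
-- (±1 endpoint deltas per span, then one prefix-sum pass emitting the labels);
-- objective: alternative algorithm of similar cost.

-- ===== PORT A =====
def from_turn_boundaries (input_ids : List Int) (attention_mask : List Int) (boundaries : List (Int × Int × String)) (train_roles : List String) : List Int :=
  let n : Int := input_ids.length
  boundaries.foldl (fun labels b =>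
    if train_roles.contains b.2.2 then
      (PySem.List.pyRange (max 0 b.1) (min b.2.1 n) 1).foldl (fun labels i =>
        -- attention_mask[i] / input_ids[i]: under Pre_ every visited i is in range,
        -- so the default 0 is never used and pyGetD is exact
        if PySem.List.pyGetD attention_mask i 0 = 1 then
          labels.set i.toNat (PySem.List.pyGetD input_ids i 0)
        else labels) labels
    else labels) (List.replicate input_ids.length (-100))

-- ===== PORT B =====
-- delta[s] += 1; delta[e] -= 1 for each matching non-empty clamped span
def pvDeltaStep (train_roles : List String) (n : Int) (d : List Int) (b : Int × Int × String) : List Int :=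
  if train_roles.contains b.2.2 then
    let s : Int := max 0 b.1
    let e : Int := min b.2.1 n
    if s < e then
      let d1 := d.set s.toNat (d.getD s.toNat 0 + 1)
      d1.set e.toNat (d1.getD e.toNat 0 - 1)
    else d
  else d

def from_turn_boundaries_alt (input_ids : List Int) (attention_mask : List Int) (boundaries : List (Int × Int × String)) (train_roles : List String) : List Int :=
  let n : Nat := input_ids.length
  let delta : List Int := boundaries.foldl (pvDeltaStep train_roles (n : Int)) (List.replicate (n + 1) 0)
  -- prefix-sum pass: cov is the running coverage count; attention_mask[i] is
  -- consulted only when cov > 0 (Python's short-circuit), where Pre_ makes pyGetD exact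
  ((List.range n).foldl (fun (st : Int × List Int) i =>
      let cov := st.1 + delta.getD i 0
      (cov, st.2 ++ [if 0 < cov ∧ PySem.List.pyGetD attention_mask (i : Int) 0 = 1 then input_ids.getD i 0 else -100]))
    ((0 : Int), ([] : List Int))).2

-- ===== PRECONDITION & SPEC =====
-- Pre_ excludes exactly the inputs where Python raises IndexError: some trained span
-- covers a position ≥ len(attention_mask) (both A and B raise there).
def Pre_from_turn_boundaries (input_ids : List Int) (attention_mask : List Int) (boundaries : List (Int × Int × String)) (train_roles : List String) : Prop :=
  ∀ b ∈ boundaries, train_roles.contains b.2.2 →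
    (min b.2.1 (input_ids.length : Int) ≤ max 0 b.1 ∨
     min b.2.1 (input_ids.length : Int) ≤ (attention_mask.length : Int))
instance (input_ids : List Int) (attention_mask : List Int) (boundaries : List (Int × Int × String)) (train_roles : List String) : Decidable (Pre_from_turn_boundaries input_ids attention_mask boundaries train_roles) := by unfold Pre_from_turn_boundaries; infer_instance

def pvWitness_from_turn_boundaries : List Int × List Int × (List (Int × Int × String)) × List String :=
  ([5, 6, 7], [1, 1, 0], [((0 : Int), (2 : Int), "user"), ((2 : Int), (3 : Int), "assistant")], ["assistant"])

def Spec_from_turn_boundaries (input_ids : List Int) (attention_mask : List Int) (boundaries : List (Int × Int × String)) (train_roles : List String) (out : List Int) : Prop := out = from_turn_boundaries_alt input_ids attention_mask boundaries train_roles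
instance (input_ids : List Int) (attention_mask : List Int) (boundaries : List (Int × Int × String)) (train_roles : List String) (out : List Int) : Decidable (Spec_from_turn_boundaries input_ids attention_mask boundaries train_roles out) := by unfold Spec_from_turn_boundaries; infer_instance

-- ===== CLAIM (what is proved, stated in full; the proofs are below) =====
def Claim_equal_from_turn_boundaries : Prop := ∀ (input_ids : List Int) (attention_mask : List Int) (boundaries : List (Int × Int × String)) (train_roles : List String), Dom_from_turn_boundaries input_ids attention_mask boundaries train_roles → Pre_from_turn_boundaries input_ids attention_mask boundaries train_roles → Spec_from_turn_boundaries input_ids attention_mask boundaries train_roles (from_turn_boundaries input_ids attention_mask boundaries train_roles)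

-- ===== LEMMAS AND PROOFS =====

-- ---------- A-side characterisation (conditional in-place writes) ----------

lemma foldl_set_length {α : Type} (L : List Int) (g : Int → Prop) [DecidablePred g] (v : Int → α)
    (acc : List α) :
    (L.foldl (fun a i => if g i then a.set i.toNat (v i) else a) acc).length = acc.length := by
  induction L generalizing acc with
  | nil => rfl
  | cons i L ih =>
      simp only [List.foldl_cons]
      rw [ih]
      split <;> simp

lemma foldl_set_getElem? {α : Type} (L : List Int) (g : Int → Prop) [DecidablePred g] (v : Int → α)
    (acc : List α) (j : Nat) (hL : ∀ i ∈ L, 0 ≤ i) :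
    (L.foldl (fun a i => if g i then a.set i.toNat (v i) else a) acc)[j]? =
      if L.any (fun i => decide (g i) && i == (j : Int)) && decide (j < acc.length)
      then some (v (j : Int)) else acc[j]? := by
  induction L generalizing acc with
  | nil => simp
  | cons i L ih =>
      have hi : 0 ≤ i := hL i (by simp)
      simp only [List.foldl_cons]
      rw [ih _ (fun x hx => hL x (List.mem_cons_of_mem _ hx))]
      by_cases hg : g i
      · rw [if_pos hg]
        by_cases hij : i = (j : Int)
        · subst hij
          simp only [Int.toNat_natCast, List.any_cons, hg, decide_true, BEq.rfl,
            Bool.and_self, Bool.true_or, Bool.true_and, List.length_set]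
          by_cases hj : j < acc.length
          · rw [List.getElem?_set_self hj]
            simp [hj]
          · have h1 : (acc.set j (v (j : Int)))[j]? = none := by
              rw [List.getElem?_eq_none] <;> simp; omega
            have h2 : acc[j]? = none := by
              rw [List.getElem?_eq_none]; omega
            simp [hj, h1, h2]
        · have hne : i.toNat ≠ j := by omega
          have hhead : (decide (g i) && (i == (j : Int))) = false := by simp [hij]
          simp only [List.any_cons, hhead, Bool.false_or, List.length_set,
            List.getElem?_set_ne hne]
      · simp [hg]

lemma ite_or_write {α : Type} (X Y D : Bool) (v e : Option α) :
    (if (Y && D) = true then v else if (X && D) = true then v else e) =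
    (if ((X || Y) && D) = true then v else e) := by
  cases X <;> cases Y <;> cases D <;> simp

-- coverage predicates (proof-side only)
def covA (attention_mask : List Int) (n : Int) (roles : List String)
    (bs : List (Int × Int × String)) (j : Nat) : Bool :=
  bs.any (fun b => roles.contains b.2.2 &&
    (PySem.List.pyRange (max 0 b.1) (min b.2.1 n) 1).any
      (fun i => decide (PySem.List.pyGetD attention_mask i 0 = 1) && i == (j : Int)))

def covB (n : Int) (roles : List String) (bs : List (Int × Int × String)) (j : Nat) : Bool :=
  bs.any (fun b => roles.contains b.2.2 &&
    (PySem.List.pyRange (max 0 b.1) (min b.2.1 n) 1).any (fun i => true && i == (j : Int)))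

lemma A_outer_get? (input_ids attention_mask : List Int) (roles : List String)
    (bs : List (Int × Int × String)) (acc : List Int) (j : Nat) :
    (bs.foldl (fun labels b =>
      if roles.contains b.2.2 then
        (PySem.List.pyRange (max 0 b.1) (min b.2.1 (input_ids.length : Int)) 1).foldl
          (fun labels i =>
            if PySem.List.pyGetD attention_mask i 0 = 1 then
              labels.set i.toNat (PySem.List.pyGetD input_ids i 0)
            else labels) labels
      else labels) acc)[j]? =
      if covA attention_mask (input_ids.length : Int) roles bs j && decide (j < acc.length)
      then some (PySem.List.pyGetD input_ids (j : Int) 0) else acc[j]? := by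
  induction bs generalizing acc with
  | nil => simp [covA]
  | cons b bs ih =>
      simp only [List.foldl_cons]
      rw [ih]
      by_cases hc : roles.contains b.2.2
      · simp only [hc, if_pos]
        have hrange : ∀ i ∈ PySem.List.pyRange (max 0 b.1) (min b.2.1 (input_ids.length : Int)) 1, 0 ≤ i := by
          intro i hi
          have := (PySem.List.mem_pyRange_one).1 hi
          omega
        have hwrite := foldl_set_getElem?
          (PySem.List.pyRange (max 0 b.1) (min b.2.1 (input_ids.length : Int)) 1)
          (fun i => PySem.List.pyGetD attention_mask i 0 = 1)
          (fun i => PySem.List.pyGetD input_ids i 0) acc j hrange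
        have hlen := foldl_set_length
          (PySem.List.pyRange (max 0 b.1) (min b.2.1 (input_ids.length : Int)) 1)
          (fun i => PySem.List.pyGetD attention_mask i 0 = 1)
          (fun i => PySem.List.pyGetD input_ids i 0) acc
        rw [hlen, hwrite]
        simp only [covA, List.any_cons, hc, Bool.true_and]
        exact ite_or_write _ _ _ _ _
      · rw [Bool.not_eq_true] at hc
        simp only [covA, List.any_cons, hc, Bool.false_and, Bool.false_or, Bool.false_eq_true, if_false]

lemma covA_eq (attention_mask : List Int) (n : Int) (roles : List String)
    (bs : List (Int × Int × String)) (j : Nat) :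
    covA attention_mask n roles bs j =
      (covB n roles bs j && (PySem.List.pyGetD attention_mask (j : Int) 0 = 1 : Bool)) := by
  simp only [covA, covB, Bool.true_and]
  rw [Bool.eq_iff_iff]
  simp only [Bool.and_eq_true, List.any_eq_true, decide_eq_true_eq, beq_iff_eq]
  constructor
  · rintro ⟨b, hb, hr, i, hi, ham, rfl⟩
    exact ⟨⟨b, hb, hr, _, hi, rfl⟩, ham⟩
  · rintro ⟨⟨b, hb, hr, i, hi, rfl⟩, ham⟩
    exact ⟨b, hb, hr, _, hi, ham, rfl⟩

-- ---------- B-side: prefix sums of the difference array ----------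

def psum (d : List Int) (j : Nat) : Int := ((List.range j).map (fun i => d.getD i 0)).sum

lemma psum_succ (d : List Int) (j : Nat) : psum d (j + 1) = psum d j + d.getD j 0 := by
  simp [psum, List.range_succ]

lemma psum_set (d : List Int) (k : Nat) (v : Int) (j : Nat) (hk : k < d.length) :
    psum (d.set k v) j = psum d j + (if k < j then v - d.getD k 0 else 0) := by
  induction j with
  | zero => simp [psum]
  | succ j ih =>
      rw [psum_succ, psum_succ, ih]
      by_cases hkj : k = j
      · subst hkj
        have : (d.set k v).getD k 0 = v := by
          simp [List.getD_eq_getElem?_getD, List.getElem?_set_self hk]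
        rw [this]
        split_ifs with h1 h2 <;> omega
      · have : (d.set k v).getD j 0 = d.getD j 0 := by
          simp [List.getD_eq_getElem?_getD, List.getElem?_set_ne hkj]
        rw [this]
        split_ifs with h1 h2 h3 <;> omega

-- the boundary b contributes 1 to psum · (j+1) exactly when it covers position j
def bCovers (roles : List String) (n : Int) (b : Int × Int × String) (j : Nat) : Bool :=
  roles.contains b.2.2 && decide (max 0 b.1 ≤ (j : Int)) && decide ((j : Int) < min b.2.1 n)

lemma pvDeltaStep_length (roles : List String) (n : Int) (d : List Int) (b : Int × Int × String) :
    (pvDeltaStep roles n d b).length = d.length := by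
  simp only [pvDeltaStep]
  split_ifs <;> simp

lemma psum_pvDeltaStep (roles : List String) (n : Int) (d : List Int) (b : Int × Int × String)
    (j : Nat) (hd : d.length = n.toNat + 1) :
    psum (pvDeltaStep roles n d b) (j + 1) =
      psum d (j + 1) + (if bCovers roles n b j then 1 else 0) := by
  unfold pvDeltaStep
  by_cases hc : roles.contains b.2.2
  · simp only [hc, if_pos]
    set s : Int := max 0 b.1 with hs
    set e : Int := min b.2.1 n with he
    by_cases hse : s < e
    · have hs0 : 0 ≤ s := le_max_left 0 b.1
      have hen : e ≤ n := min_le_right _ _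
      have h0n : (0:Int) < n := lt_of_le_of_lt hs0 (lt_of_lt_of_le hse hen)
      have hsl : s.toNat < d.length := by omega
      have hel : e.toNat < d.length := by omega
      simp only [hse, if_pos]
      rw [psum_set _ _ _ _ (by rw [List.length_set]; exact hel),
          psum_set _ _ _ _ hsl]
      have hcov : bCovers roles n b j = true ↔ (s.toNat < j + 1 ∧ ¬ e.toNat < j + 1) := by
        simp only [bCovers, hc, Bool.true_and, Bool.and_eq_true, decide_eq_true_eq]
        omega
      by_cases hetj : e.toNat < j + 1
      · have hstj : s.toNat < j + 1 := by omega
        have hgd : (d.set s.toNat (d.getD s.toNat 0 + 1)).getD e.toNat 0 = d.getD e.toNat 0 := by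
          have : s.toNat ≠ e.toNat := by omega
          simp [List.getD_eq_getElem?_getD, List.getElem?_set_ne this]
        rw [hgd]
        simp only [hstj, hetj, if_pos, hcov]
        simp only [hetj, not_true_eq_false, and_false, if_false]
        ring
      · by_cases hstj : s.toNat < j + 1
        · simp only [hetj, if_neg, not_false_iff, hstj, if_pos, hcov]
          simp only [hstj, hetj, not_false_iff, and_true, if_pos]
          ring
        · simp only [hetj, hstj, if_neg, not_false_iff, hcov]
          simp only [hstj, false_and, if_false]
          ring
    · simp only [hse, if_neg, not_false_iff]
      have hnc : ¬ bCovers roles n b j = true := by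
        simp only [bCovers, Bool.and_eq_true, decide_eq_true_eq]
        rintro ⟨⟨_, h1⟩, h2⟩; omega
      simp [hnc]
  · rw [Bool.not_eq_true] at hc
    have hnc : ¬ bCovers roles n b j = true := by
      simp only [bCovers, Bool.and_eq_true, decide_eq_true_eq]
      rintro ⟨⟨h, _⟩, _⟩
      rw [hc] at h
      simp at h
    simp only [hc, Bool.false_eq_true, if_false, if_neg hnc, add_zero]

lemma psum_foldl (roles : List String) (n : Int) (bs : List (Int × Int × String))
    (d : List Int) (j : Nat) (hd : d.length = n.toNat + 1) :
    psum (bs.foldl (pvDeltaStep roles n) d) (j + 1) =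
      psum d (j + 1) + (bs.countP (fun b => bCovers roles n b j) : Int) := by
  induction bs generalizing d with
  | nil => simp
  | cons b bs ih =>
      simp only [List.foldl_cons]
      rw [ih _ (by rw [pvDeltaStep_length]; exact hd), psum_pvDeltaStep roles n d b j hd,
          List.countP_cons]
      by_cases h : bCovers roles n b j = true
      · simp only [h, if_true, if_pos]
        push_cast
        ring
      · simp only [h, Bool.false_eq_true, if_false, if_neg h]
        push_cast
        ring

lemma psum_replicate_zero (m j : Nat) : psum (List.replicate m 0) (j + 1) = 0 := by
  induction j with
  | zero => simp [psum, List.getD_eq_getElem?_getD, List.getElem?_replicate]; split <;> rfl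
  | succ j ih =>
      rw [psum_succ, ih]
      simp [List.getD_eq_getElem?_getD, List.getElem?_replicate]
      split <;> rfl

lemma covB_iff_count (n : Nat) (roles : List String) (bs : List (Int × Int × String)) (j : Nat) :
    covB (n : Int) roles bs j = true ↔
      0 < bs.countP (fun b => bCovers roles (n : Int) b j) := by
  rw [List.countP_pos_iff]
  unfold covB bCovers
  simp only [List.any_eq_true, Bool.and_eq_true, Bool.true_and, beq_iff_eq,
    decide_eq_true_eq]
  constructor
  · rintro ⟨b, hb, hr, i, hi, rfl⟩
    have h := (PySem.List.mem_pyRange_one).1 hi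
    exact ⟨b, hb, ⟨hr, h.1⟩, h.2⟩
  · rintro ⟨b, hb, ⟨hr, h1⟩, h2⟩
    exact ⟨b, hb, hr, (j : Int), (PySem.List.mem_pyRange_one).2 ⟨h1, h2⟩, rfl⟩

-- the prefix-sum pass computes (psum delta m, labels for positions < m)
lemma B_loop_state (delta input_ids attention_mask : List Int) (m : Nat) :
    ((List.range m).foldl (fun (st : Int × List Int) i =>
      let cov := st.1 + delta.getD i 0
      (cov, st.2 ++ [if 0 < cov ∧ PySem.List.pyGetD attention_mask (i : Int) 0 = 1 then input_ids.getD i 0 else -100]))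
      ((0 : Int), ([] : List Int))) =
    (psum delta m, (List.range m).map (fun i =>
      if 0 < psum delta (i + 1) ∧ PySem.List.pyGetD attention_mask (i : Int) 0 = 1
      then input_ids.getD i 0 else -100)) := by
  induction m with
  | zero => simp [psum]
  | succ m ih =>
      rw [List.range_succ, List.foldl_append, ih]
      simp only [List.foldl_cons, List.foldl_nil, List.map_append, List.map_cons, List.map_nil]
      rw [← psum_succ]

-- ===== VERDICT (by name: the statement is the Claim_ definition above) =====
theorem from_turn_boundaries_spec : Claim_equal_from_turn_boundaries := by
  intro input_ids attention_mask boundaries train_roles _hdom _hpre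
  show from_turn_boundaries input_ids attention_mask boundaries train_roles =
    from_turn_boundaries_alt input_ids attention_mask boundaries train_roles
  simp only [from_turn_boundaries, from_turn_boundaries_alt]
  rw [B_loop_state]
  apply List.ext_getElem?
  intro j
  rw [A_outer_get? input_ids attention_mask train_roles boundaries _ j]
  rw [List.getElem?_map]
  set n : Nat := input_ids.length with hn
  by_cases hj : j < n
  · rw [List.getElem?_range hj]
    have hps : psum (boundaries.foldl (pvDeltaStep train_roles (n : Int)) (List.replicate (n + 1) 0)) (j + 1) =
        (boundaries.countP (fun b => bCovers train_roles (n : Int) b j) : Int) := by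
      rw [psum_foldl _ _ _ _ _ (by simp), psum_replicate_zero]
      ring
    have hcb : covB (n : Int) train_roles boundaries j = true ↔
        0 < psum (boundaries.foldl (pvDeltaStep train_roles (n : Int)) (List.replicate (n + 1) 0)) (j + 1) := by
      rw [hps, covB_iff_count]
      exact_mod_cast Iff.rfl
    rw [covA_eq]
    simp only [List.length_replicate, hj, decide_true, Bool.and_true, Option.map_some]
    by_cases hc : covB (n : Int) train_roles boundaries j = true <;>
      by_cases ham : PySem.List.pyGetD attention_mask (j : Int) 0 = 1
    · have := hcb.1 hc
      simp [hc, ham, this, PySem.List.pyGetD_of_nonneg, List.getD_eq_getElem?_getD,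
        List.getElem?_eq_getElem hj, PySem.List.pyGetD_natCast]
    · have hp := hcb.1 hc
      have ham' : ¬ attention_mask[j]?.getD 0 = 1 := by
        simpa [PySem.List.pyGetD_natCast, List.getD_eq_getElem?_getD] using ham
      simp [hc, ham', hp, List.getElem?_replicate, hj]
    · have hnot : ¬ 0 < psum (boundaries.foldl (pvDeltaStep train_roles (n : Int)) (List.replicate (n + 1) 0)) (j + 1) := fun h => hc (hcb.2 h)
      simp [hc, ham, hnot, List.getElem?_replicate, hj]
    · have hnot : ¬ 0 < psum (boundaries.foldl (pvDeltaStep train_roles (n : Int)) (List.replicate (n + 1) 0)) (j + 1) := fun h => hc (hcb.2 h)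
      simp [hc, ham, hnot, List.getElem?_replicate, hj]
  · have h1 : (List.range n)[j]? = none := List.getElem?_eq_none (by simp; omega)
    have h2 : (List.replicate n (-100 : Int))[j]? = none := List.getElem?_eq_none (by simp; omega)
    simp [h1, h2, hj]
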